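-- pv_equiv track=rewrite | github.com/mshoaib2502/mshoaib | imageFilename/changeImageName.py | populateFileDateDict
-- ===== SOURCE A (Python) =====
-- def getDateFromFilename(filename):
--     if "-" in filename:
--         dateTime = filename[0:4] + filename[5:7] + filename[11:13]
--     else:
--         dateTime = filename[0:8]
--     return dateTime
--
-- def populateFileDateDict(files):
--     fileDateDict = {}
--     prevDateTime = ""
--     for filename in files:
--         dateTime = getDateFromFilename(filename)
--
--         if prevDateTime != dateTime:
--             fileDateDict[dateTime] = 1
--         else:
--             fileDateDict[dateTime] = fileDateDict[dateTime] + 1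
--         prevDateTime = dateTime
--     return fileDateDict
-- ===== SOURCE B (Python) =====
-- def getDateFromFilename(filename):
--     if "-" in filename:
--         dateTime = filename[0:4] + filename[5:7] + filename[11:13]
--     else:
--         dateTime = filename[0:8]
--     return dateTime
--
-- def _runs(dates):
--     # consecutive runs of equal dates as (date, length) pairs
--     if not dates:
--         return []
--     out = []
--     cur = dates[0]
--     cnt = 1
--     for x in dates[1:]:
--         if x == cur:
--             cnt += 1
--         else:
--             out.append((cur, cnt))
--             cur = x
--             cnt = 1
--     out.append((cur, cnt))
--     return out
--
-- def populateFileDateDict(files):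
--     fileDateDict = {}
--     for date, count in _runs([getDateFromFilename(f) for f in files]):
--         fileDateDict[date] = count
--     return fileDateDict
-- ===== Notes on version B (the rewrite author's own statement) =====
-- stated objective: idiomatic
-- what changed: B first maps filenames to dates, compresses that list into (date, run-length) pairs in one pass, and then writes each run's length into the dict, instead of A's per-file conditional increment with a prev-date register; the last run of a date still overwrites earlier ones.
import Mathlib
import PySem

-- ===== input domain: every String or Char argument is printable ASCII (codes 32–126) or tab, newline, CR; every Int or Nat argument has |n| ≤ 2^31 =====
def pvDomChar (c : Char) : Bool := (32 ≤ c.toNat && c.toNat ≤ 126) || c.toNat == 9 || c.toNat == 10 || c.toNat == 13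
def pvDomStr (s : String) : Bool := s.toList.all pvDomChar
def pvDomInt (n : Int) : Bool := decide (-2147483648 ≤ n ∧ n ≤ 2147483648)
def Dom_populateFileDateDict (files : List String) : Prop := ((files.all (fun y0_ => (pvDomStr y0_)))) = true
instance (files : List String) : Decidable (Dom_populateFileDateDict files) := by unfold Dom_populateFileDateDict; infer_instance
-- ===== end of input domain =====

-- B maps filenames to dates, compresses consecutive runs into (date, length) pairs,
-- then writes each run into the dict (idiomatic decomposition; same cost as A).


-- ===== PORT A =====
def getDateFromFilename (filename : String) : String :=
  if PySem.Str.isIn "-" filename then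
    PySem.Str.join "" [PySem.Str.slice filename (some 0) (some 4),
                       PySem.Str.slice filename (some 5) (some 7),
                       PySem.Str.slice filename (some 11) (some 13)]
  else
    PySem.Str.slice filename (some 0) (some 8)

def populateFileDateDict (files : List String) : List (String × Int) :=
  (files.foldl
    (fun (st : PySem.Dict String Int × String) filename =>
      let dateTime := getDateFromFilename filename
      if st.2 ≠ dateTime then (st.1.insert dateTime 1, dateTime)
      -- Python's fileDateDict[dateTime] raises KeyError when the key is missing
      -- (only reachable when the first filename is ""); that input is outside
      -- Pre_; getD 0 stands in for the lookup there.
      else (st.1.insert dateTime (st.1.getD dateTime 0 + 1), dateTime))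
    (PySem.Dict.empty, "")).1.items

-- ===== PORT B =====
-- consecutive runs of equal dates as (date, length) pairs (Source B's _runs)
def runsOf (dates : List String) : List (String × Int) :=
  match dates with
  | [] => []
  | d0 :: rest =>
    let st := rest.foldl
      (fun (st : List (String × Int) × String × Int) x =>
        if x = st.2.1 then (st.1, st.2.1, st.2.2 + 1)
        else (st.1 ++ [(st.2.1, st.2.2)], x, 1))
      ([], d0, 1)
    st.1 ++ [(st.2.1, st.2.2)]

def populateFileDateDict_alt (files : List String) : List (String × Int) :=
  ((runsOf (files.map getDateFromFilename)).foldl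
    (fun (d : PySem.Dict String Int) p => d.insert p.1 p.2)
    PySem.Dict.empty).items

-- ===== PRECONDITION & SPEC =====
-- Pre_ excludes exactly the inputs on which Python A raises KeyError: a first
-- filename equal to "", whose date "" equals the initial prevDateTime "".
def Pre_populateFileDateDict (files : List String) : Prop := files.head? ≠ some ""
instance (files : List String) : Decidable (Pre_populateFileDateDict files) := by unfold Pre_populateFileDateDict; infer_instance
def pvWitness_populateFileDateDict : List String := ["2020-01-02xy.jpg", "20200103.jpg", "20200103.jpg"]

def Spec_populateFileDateDict (files : List String) (out : List (String × Int)) : Prop := out = populateFileDateDict_alt files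
instance (files : List String) (out : List (String × Int)) : Decidable (Spec_populateFileDateDict files out) := by unfold Spec_populateFileDateDict; infer_instance

-- ===== CLAIM (what is proved, stated in full; the proofs are below) =====
def Claim_equal_populateFileDateDict : Prop := ∀ (files : List String), Dom_populateFileDateDict files → Pre_populateFileDateDict files → Spec_populateFileDateDict files (populateFileDateDict files)

-- ===== LEMMAS AND PROOFS =====

-- B's dict-filling fold, starting from empty
def insRuns (rs : List (String × Int)) : PySem.Dict String Int :=
  rs.foldl (fun (d : PySem.Dict String Int) p => d.insert p.1 p.2) PySem.Dict.empty

lemma insRuns_append_singleton (rs : List (String × Int)) (c : String) (n : Int) :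
    insRuns (rs ++ [(c, n)]) = (insRuns rs).insert c n := by
  simp [insRuns]

-- Invariant: A's dict mid-run is B's dict for the finished runs, with the open
-- run's current count inserted on top.
lemma loop_invariant (xs : List String) :
    ∀ (out : List (String × Int)) (cur : String) (cnt : Int),
      (xs.foldl
        (fun (st : PySem.Dict String Int × String) dt =>
          if st.2 ≠ dt then (st.1.insert dt 1, dt)
          else (st.1.insert dt (st.1.getD dt 0 + 1), dt))
        ((insRuns out).insert cur cnt, cur)).1
      =
      insRuns ((xs.foldl
          (fun (st : List (String × Int) × String × Int) x =>
            if x = st.2.1 then (st.1, st.2.1, st.2.2 + 1)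
            else (st.1 ++ [(st.2.1, st.2.2)], x, 1))
          (out, cur, cnt)).1
        ++ [((xs.foldl
          (fun (st : List (String × Int) × String × Int) x =>
            if x = st.2.1 then (st.1, st.2.1, st.2.2 + 1)
            else (st.1 ++ [(st.2.1, st.2.2)], x, 1))
          (out, cur, cnt)).2.1,
          (xs.foldl
          (fun (st : List (String × Int) × String × Int) x =>
            if x = st.2.1 then (st.1, st.2.1, st.2.2 + 1)
            else (st.1 ++ [(st.2.1, st.2.2)], x, 1))
          (out, cur, cnt)).2.2)]) := by
  induction xs with
  | nil =>
    intro out cur cnt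
    simp [insRuns_append_singleton]
  | cons y ys ih =>
    intro out cur cnt
    by_cases h : y = cur
    · subst h
      simp only [List.foldl_cons]
      rw [if_pos (trivial : True), if_neg (not_not_intro (rfl : y = y)),
        PySem.Dict.getD_insert_self, PySem.Dict.insert_insert_self]
      exact ih out y (cnt + 1)
    · simp only [List.foldl_cons]
      rw [if_pos (Ne.symm h), if_neg h, ← insRuns_append_singleton]
      exact ih (out ++ [(cur, cnt)]) y 1

-- A's loop over files is the date-level loop over the mapped date list
lemma foldA_map (l : List String) :
    ∀ (st : PySem.Dict String Int × String),
      List.foldl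
        (fun (st : PySem.Dict String Int × String) filename =>
          let dateTime := getDateFromFilename filename
          if st.2 ≠ dateTime then (st.1.insert dateTime 1, dateTime)
          else (st.1.insert dateTime (st.1.getD dateTime 0 + 1), dateTime)) st l
      = List.foldl
          (fun (st : PySem.Dict String Int × String) dt =>
            if st.2 ≠ dt then (st.1.insert dt 1, dt)
            else (st.1.insert dt (st.1.getD dt 0 + 1), dt)) st
          (l.map getDateFromFilename) := by
  induction l with
  | nil => intro st; rfl
  | cons f fs ih => intro st; simp only [List.foldl_cons, List.map_cons]; exact ih _

-- ===== VERDICT (by name: the statement is the Claim_ definition above) =====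
theorem populateFileDateDict_spec : Claim_equal_populateFileDateDict := by
  intro files _ _
  unfold Spec_populateFileDateDict populateFileDateDict populateFileDateDict_alt
  rw [foldA_map]
  cases hm : files.map getDateFromFilename with
  | nil => rfl
  | cons d0 rest =>
    simp only [List.foldl_cons]
    have st1 : (if ("" : String) ≠ d0 then ((PySem.Dict.empty : PySem.Dict String Int).insert d0 1, d0)
                else ((PySem.Dict.empty : PySem.Dict String Int).insert d0
                        ((PySem.Dict.empty : PySem.Dict String Int).getD d0 0 + 1), d0))
              = (((insRuns []).insert d0 1 : PySem.Dict String Int), d0) := by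
      by_cases h0 : ("" : String) = d0
      · subst h0
        rw [if_neg (not_not_intro rfl)]
        simp [insRuns, PySem.Dict.getD_empty]
      · rw [if_pos h0]
        rfl
    rw [st1]
    exact congrArg PySem.Dict.items (loop_invariant rest [] d0 1)
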